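-- pv_equiv track=rewrite | github.com/kolxz2/Education | Python_code/First_code/3_summer69.py | mine
-- ===== SOURCE A (Python) =====
-- def mine(arr):
--     result = 0
--     flag = True
--     for i in arr:
--         while flag:
--             if i != 6:
--                 result += i
--                 break
--             else:
--                 flag = False
--         while not flag:
--             if i != 9:
--                 break
--             else:
--                 flag = True
--                 break
--     return result
-- ===== SOURCE B (Python) =====
-- def mine(arr):
--     result = 0
--     it = iter(arr)
--     for n in it:
--         if n == 6:
--             for m in it:
--                 if m == 9:
--                     break
--         else:
--             result += n
--     return result
-- ===== Notes on version B (the rewrite author's own statement) =====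
-- stated objective: idiomatic
-- what changed: Replaced A's explicit boolean flag and its two per-element while-loops by a shared iterator: on a 6 an inner loop drains the iterator up to the next 9, so no skip flag is maintained across iterations.
import Mathlib
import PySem

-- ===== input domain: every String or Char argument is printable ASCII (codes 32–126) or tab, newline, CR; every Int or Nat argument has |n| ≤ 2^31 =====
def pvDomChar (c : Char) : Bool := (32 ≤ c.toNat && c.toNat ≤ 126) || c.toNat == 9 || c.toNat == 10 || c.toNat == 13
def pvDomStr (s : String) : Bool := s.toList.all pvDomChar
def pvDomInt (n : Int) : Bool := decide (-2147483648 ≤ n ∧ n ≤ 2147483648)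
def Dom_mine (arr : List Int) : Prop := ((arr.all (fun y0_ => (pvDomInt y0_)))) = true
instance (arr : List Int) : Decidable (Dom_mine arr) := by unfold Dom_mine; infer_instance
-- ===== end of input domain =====

-- B: iterator/drain decomposition instead of A's flag-machine; same O(n) cost, no flag state.

-- ===== PORT A =====
-- state = (result, flag); each loop iteration of A: the first while adds i or clears
-- the flag (when i = 6), the second while re-sets the flag exactly when i = 9.
def mineStep (st : Int × Bool) (i : Int) : Int × Bool :=
  let st1 := if st.2 then (if i ≠ 6 then (st.1 + i, st.2) else (st.1, false)) else st
  if ¬ st1.2 then (if i = 9 then (st1.1, true) else st1) else st1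

def mine (arr : List Int) : Int := (arr.foldl mineStep (0, true)).1

-- ===== PORT B =====
-- inner `for m in it: if m == 9: break` — returns the part of the iterator after the first 9
def mineAltSkip : List Int → List Int
  | [] => []
  | m :: rest => if m = 9 then rest else mineAltSkip rest

theorem mineAltSkip_length_le : ∀ (l : List Int), (mineAltSkip l).length ≤ l.length := by
  intro l
  induction l with
  | nil => simp [mineAltSkip]
  | cons m rest ih =>
    simp only [mineAltSkip]
    split
    · simp
    · exact Nat.le_succ_of_le ih

-- outer `for n in it` with accumulator result
def mineAltLoop (result : Int) : List Int → Int
  | [] => result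
  | n :: it =>
    if n = 6 then mineAltLoop result (mineAltSkip it)
    else mineAltLoop (result + n) it
termination_by it => it.length
decreasing_by
  · exact Nat.lt_succ_of_le (mineAltSkip_length_le it)
  · simp

def mine_alt (arr : List Int) : Int := mineAltLoop 0 arr

-- ===== PRECONDITION & SPEC =====
def Spec_mine (arr : List Int) (out : Int) : Prop := out = mine_alt arr
instance (arr : List Int) (out : Int) : Decidable (Spec_mine arr out) := by unfold Spec_mine; infer_instance

-- ===== CLAIM (what is proved, stated in full; the proofs are below) =====
def Claim_equal_mine : Prop := ∀ (arr : List Int), Dom_mine arr → Spec_mine arr (mine arr)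

-- ===== LEMMAS AND PROOFS =====
theorem mine_invariant : ∀ (arr : List Int) (result : Int),
    ((arr.foldl mineStep (result, true)).1 = mineAltLoop result arr) ∧
    ((arr.foldl mineStep (result, false)).1 = mineAltLoop result (mineAltSkip arr)) := by
  intro arr
  induction arr with
  | nil => intro result; simp [mineAltLoop, mineAltSkip]
  | cons i rest ih =>
    intro result
    refine ⟨?_, ?_⟩
    · by_cases h6 : i = 6
      · subst h6; simpa [mineStep, mineAltLoop] using (ih result).2
      · simpa [mineStep, mineAltLoop, h6] using (ih (result + i)).1
    · by_cases h9 : i = 9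
      · subst h9; simpa [mineStep, mineAltSkip] using (ih result).1
      · simpa [mineStep, mineAltSkip, h9] using (ih result).2

-- ===== VERDICT (by name: the statement is the Claim_ definition above) =====
theorem mine_spec : Claim_equal_mine := by
  intro arr _
  unfold Spec_mine mine mine_alt
  exact (mine_invariant arr 0).1
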